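-- pv_equiv track=rewrite | github.com/carltonlab/chromosome-partitioning | c069_plots_combine_by_time_point.py | get_time_point_list_order
-- ===== SOURCE A (Python) =====
-- def get_time_point_list_order(time_point_list):
--
--     #get the time point list order
--     time_point_list_order = []
--
--     #make a list without letters
--     no_letter_list = []
--
--     #flag for time list
--     list_of_flags = []
--
--     #make a to take out list
--     to_take_out_list = []
--
--     #set a counter for the time point
--     times_ordering_counter = 0
--
--     #go through each time point
--     for time_point in time_point_list:
--
--         #get only the numeric characters from the time point string
--         no_letter_time_point = ""
--
--         #go through each character in the time point
--         for character in time_point: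
--
--             #if the character is a number
--             if character.isnumeric():
--
--                 #add the character to the no letter time point
--                 no_letter_time_point = no_letter_time_point + character
--
--         #if the no letter time point is ""
--         if no_letter_time_point == "":
--
--             #set it to an "a"
--             no_letter_time_point = time_point
--
--             #add a 1 to the list of flags
--             list_of_flags.append(times_ordering_counter)
--
--             #add the time point to the to take out list
--             to_take_out_list.append(times_ordering_counter)
--
--             #add 1 to the times ordering counter
--             times_ordering_counter = times_ordering_counter + 1
--
--         #if the no letter time point is not ""
--         else:
--
--             #add a 0 to the list of flags
--             list_of_flags.append(times_ordering_counter)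
--
--             #add 1 to the times ordering counter
--             times_ordering_counter = times_ordering_counter + 1
--
--         #add the no letter time point to the no letter list
--         no_letter_list.append(no_letter_time_point)
--
--     #get a list for the a's
--     a_list = []
--
--     #get a list for the b's
--     b_list = []
--
--     #get a c_list
--     actual_time_list = []
--
--     #loop through the list of flags
--     for flag in list_of_flags:
--
--         #if the flag is in the to take out list
--         if flag in to_take_out_list:
--
--             #add the corresponding time point to the a list
--             a_list.append(time_point_list[list_of_flags.index(flag)])
--
--         #if the flag is not in the to take out list
--         else:
--
--             #add the corresponding no letter list as an int to the b list
--             b_list.append(int(no_letter_list[list_of_flags.index(flag)]))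
--
--             #add the corresponding time point to the actual time list
--             actual_time_list.append(time_point_list[list_of_flags.index(flag)])
--
--     #sort the a list
--     a_list.sort()
--
--     #sort the actual time list based on the b list
--     actual_time_list_order = [x for _,x in sorted(zip(b_list, actual_time_list))]
--
--     #join the actual time list order and the a list in the time point list order
--     time_point_list_order = a_list + actual_time_list_order
--
--     return time_point_list_order
-- ===== SOURCE B (Python) =====
-- def get_time_point_list_order(time_point_list):
--     def key(tp):
--         digits = "".join(c for c in tp if c.isnumeric())
--         if digits == "":
--             return (0, 0, tp)
--         return (1, int(digits), tp)
--     return sorted(time_point_list, key=key)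
-- ===== Notes on version B (the rewrite author's own statement) =====
-- stated objective: faster
-- what changed: Replaces A's flag/counter bookkeeping, the quadratic list.index-based second loop, the partition into three parallel lists and the two separate sorts (a_list.sort() plus sorted(zip(b_list, actual_time_list))) with a single sorted() call on a composite key (group flag, numeric value of the digits, original string).
import Mathlib
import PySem

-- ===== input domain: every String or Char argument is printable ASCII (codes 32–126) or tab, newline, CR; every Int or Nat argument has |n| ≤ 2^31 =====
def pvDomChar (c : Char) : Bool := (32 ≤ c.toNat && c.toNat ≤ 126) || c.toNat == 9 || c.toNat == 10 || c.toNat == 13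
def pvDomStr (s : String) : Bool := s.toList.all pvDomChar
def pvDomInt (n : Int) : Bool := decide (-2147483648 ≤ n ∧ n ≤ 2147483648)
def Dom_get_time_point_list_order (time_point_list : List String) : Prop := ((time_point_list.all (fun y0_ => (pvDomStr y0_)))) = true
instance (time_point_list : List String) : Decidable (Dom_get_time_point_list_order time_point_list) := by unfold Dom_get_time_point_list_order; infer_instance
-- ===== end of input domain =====

-- B replaces A's flag/counter/index machinery (quadratic via list.index) and its two
-- separate sorts with one sorted() call on a composite key (group flag, numeric value,
-- original string); measured faster in a timing run.

-- ===== PORT A =====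
-- Literal transliteration of A. Strings under construction are carried as List Char
-- (Python's `s + character`); `character.isnumeric()` is PySem.Chars.isdigit, exact on the
-- printable-ASCII domain. The `.getD` defaults after index?/pyGet?/ofStr? are never taken:
-- every flag occurs in list_of_flags, the resulting index is < len(time_point_list), and in
-- the else branch the looked-up string is a non-empty all-digit string, so Python never
-- raises ValueError/IndexError here.
def get_time_point_list_order (time_point_list : List String) : List String :=
  -- first loop: state = (no_letter_list, list_of_flags, to_take_out_list, times_ordering_counter)
  let st := time_point_list.foldl
    (fun (s : List String × List Int × List Int × Int) time_point =>
      let no_letter_time_point :=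
        time_point.toList.foldl (fun acc c => if PySem.Chars.isdigit c then acc ++ [c] else acc) []
      if no_letter_time_point = [] then
        -- no_letter_time_point = time_point; flag and to-take-out entries appended
        (s.1 ++ [time_point], s.2.1 ++ [s.2.2.2], s.2.2.1 ++ [s.2.2.2], s.2.2.2 + 1)
      else
        (s.1 ++ [String.ofList no_letter_time_point], s.2.1 ++ [s.2.2.2], s.2.2.1, s.2.2.2 + 1))
    ([], [], [], 0)
  let no_letter_list := st.1
  let list_of_flags := st.2.1
  let to_take_out_list := st.2.2.1
  -- second loop: state = (a_list, b_list, actual_time_list)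
  let st2 := list_of_flags.foldl
    (fun (s : List String × List Int × List String) flag =>
      if flag ∈ to_take_out_list then
        (s.1 ++ [(PySem.List.pyGet? time_point_list ((PySem.List.index? list_of_flags flag).getD 0)).getD ""],
         s.2.1, s.2.2)
      else
        (s.1,
         s.2.1 ++ [(PySem.Int.ofStr? ((PySem.List.pyGet? no_letter_list ((PySem.List.index? list_of_flags flag).getD 0)).getD "")).getD 0],
         s.2.2 ++ [(PySem.List.pyGet? time_point_list ((PySem.List.index? list_of_flags flag).getD 0)).getD ""]))
    ([], [], [])
  let a_list := PySem.List.sorted st2.1 (fun x => x)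
  let actual_time_list_order := (PySem.List.sorted2 (List.zip st2.2.1 st2.2.2) Prod.fst Prod.snd).map Prod.snd
  a_list ++ actual_time_list_order

-- ===== PORT B =====
-- Source B's key helper: Python's tuple (0, 0, tp) / (1, int(digits), tp) compares
-- lexicographically; it is carried as the order-isomorphic nesting (g, (n, tp)) with the
-- last two components a Lex pair, and sorted(l, key=key) is PySem.List.sorted2 over the two
-- components. int(digits) on the non-empty all-digit string always succeeds, so the
-- .getD 0 default is never taken.
def pvKey (tp : String) : Int × Lex (Int × String) :=
  let digits := tp.toList.filter (fun c => PySem.Chars.isdigit c)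
  if digits = [] then (0, toLex (0, tp))
  else (1, toLex ((PySem.Int.ofChars? digits).getD 0, tp))

def get_time_point_list_order_alt (time_point_list : List String) : List String :=
  PySem.List.sorted2 time_point_list (fun tp => (pvKey tp).1) (fun tp => (pvKey tp).2)

-- ===== PRECONDITION & SPEC =====
def Spec_get_time_point_list_order (time_point_list : List String) (out : List String) : Prop := out = get_time_point_list_order_alt time_point_list
instance (time_point_list : List String) (out : List String) : Decidable (Spec_get_time_point_list_order time_point_list out) := by unfold Spec_get_time_point_list_order; infer_instance

-- ===== CLAIM (what is proved, stated in full; the proofs are below) =====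
def Claim_equal_get_time_point_list_order : Prop := ∀ (time_point_list : List String), Dom_get_time_point_list_order time_point_list → Spec_get_time_point_list_order time_point_list (get_time_point_list_order time_point_list)

-- ===== LEMMAS AND PROOFS =====

-- proof-only abbreviations
def pvDig (tp : String) : List Char := tp.toList.filter (fun c => PySem.Chars.isdigit c)
def pvP (tp : String) : Bool := decide (pvDig tp = [])
def pvNum (tp : String) : Int := (PySem.Int.ofChars? (pvDig tp)).getD 0
def pvNL (tp : String) : String := if pvDig tp = [] then tp else String.ofList (pvDig tp)
def pvK2 (tp : String) : Lex (Int × String) := toLex (pvNum tp, tp)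
def pvKeyL (tp : String) : Lex (Int × Lex (Int × String)) := toLex ((pvKey tp).1, (pvKey tp).2)

-- counters appended by loop 1
def pvFlg : List String → Int → List Int
  | [], _ => []
  | _ :: t, c => c :: pvFlg t (c + 1)

-- to_take_out entries appended by loop 1
def pvTto : List String → Int → List Int
  | [], _ => []
  | x :: t, c => (if pvDig x = [] then [c] else []) ++ pvTto t (c + 1)

theorem pvNoLetter_eq (tp : String) :
    tp.toList.foldl (fun acc c => if PySem.Chars.isdigit c then acc ++ [c] else acc) [] = pvDig tp := by
  simpa [pvDig] using PySem.List.foldl_append_if_eq_filter (fun c => PySem.Chars.isdigit c) tp.toList []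

theorem pvLoop1 (l : List String) (A : List String) (F T : List Int) (c : Int) :
    l.foldl
      (fun (s : List String × List Int × List Int × Int) time_point =>
        if pvDig time_point = [] then
          (s.1 ++ [time_point], s.2.1 ++ [s.2.2.2], s.2.2.1 ++ [s.2.2.2], s.2.2.2 + 1)
        else
          (s.1 ++ [String.ofList (pvDig time_point)], s.2.1 ++ [s.2.2.2], s.2.2.1, s.2.2.2 + 1))
      (A, F, T, c)
    = (A ++ l.map pvNL, F ++ pvFlg l c, T ++ pvTto l c, c + l.length) := by
  induction l generalizing A F T c with
  | nil => simp [pvFlg, pvTto]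
  | cons x t ih =>
    by_cases h : pvDig x = [] <;>
      simp [h, pvNL, ih, pvFlg, pvTto] <;> omega

theorem pvTto_lower {l : List String} {c x : Int} (hx : x ∈ pvTto l c) : c ≤ x := by
  induction l generalizing c with
  | nil => simp [pvTto] at hx
  | cons y t ih =>
    simp only [pvTto, List.mem_append, List.mem_ite_nil_right, List.mem_singleton] at hx
    rcases hx with ⟨_, rfl⟩ | hx
    · exact le_refl _
    · have := ih hx; omega

theorem pvMem_tto {l : List String} {i : Nat} (hi : i < l.length) (c : Int) :
    ((c + i : Int) ∈ pvTto l c) ↔ pvDig (l[i]) = [] := by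
  induction l generalizing c i with
  | nil => simp at hi
  | cons x t ih =>
    cases i with
    | zero =>
      simp only [pvTto, List.mem_append, List.mem_ite_nil_right, List.mem_singleton]
      constructor
      · rintro (⟨h, _⟩ | h)
        · simpa using h
        · exact absurd (pvTto_lower h) (by omega)
      · intro h; exact Or.inl ⟨h, by simp⟩
    | succ j =>
      have hj : j < t.length := by simpa using hi
      have : (c + (j + 1 : Nat) : Int) = (c + 1) + j := by push_cast; ring
      simp only [pvTto, List.mem_append, List.mem_ite_nil_right, List.mem_singleton, this,
        ih hj (c + 1)]
      constructor
      · rintro (⟨_, h⟩ | h)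
        · omega
        · simpa using h
      · intro h; right; simpa using h

theorem pvIndex_flg {l : List String} {i : Nat} (hi : i < l.length) (c : Int) :
    PySem.List.index? (pvFlg l c) (c + i) = some i := by
  induction l generalizing c i with
  | nil => simp at hi
  | cons x t ih =>
    cases i with
    | zero => simpa [pvFlg] using PySem.List.index?_cons_self c (pvFlg t (c + 1))
    | succ j =>
      have hj : j < t.length := by simpa using hi
      have hne : c ≠ c + (j + 1 : Nat) := by push_cast; omega
      have : (c + (j + 1 : Nat) : Int) = (c + 1) + j := by push_cast; ring
      rw [pvFlg, PySem.List.index?_cons_of_ne _ hne, this, ih hj (c + 1)]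
      rfl

theorem pvFlg_eq_map_range (l : List String) :
    pvFlg l 0 = List.map (fun i : Nat => (i : Int)) (List.range l.length) := by
  have key : ∀ (l : List String) (c : Int),
      pvFlg l c = List.map (fun i : Nat => c + (i : Int)) (List.range l.length) := by
    intro l
    induction l with
    | nil => intro c; simp [pvFlg]
    | cons x t ih =>
      intro c
      rw [pvFlg, ih (c + 1), List.length_cons, List.range_succ_eq_map, List.map_cons,
        List.map_map]
      congr 1
      · omega
      · apply List.map_congr_left; intro a _; simp; ring
  rw [key l 0]
  apply List.map_congr_left; intro a _; omega

theorem pvLoop2 (l : List String) (a : List String) (b : List Int) (act : List String) :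
    l.foldl
      (fun (s : List String × List Int × List String) tp =>
        if pvDig tp = [] then (s.1 ++ [tp], s.2.1, s.2.2)
        else (s.1, s.2.1 ++ [pvNum tp], s.2.2 ++ [tp]))
      (a, b, act)
    = (a ++ l.filter pvP, b ++ (l.filter (fun tp => !pvP tp)).map pvNum,
       act ++ l.filter (fun tp => !pvP tp)) := by
  induction l generalizing a b act with
  | nil => simp
  | cons x t ih =>
    by_cases h : pvDig x = [] <;> simp [h, pvP, ih, List.append_assoc]

theorem pvMap_getElem?_range (l : List String) :
    (List.range l.length).map (fun i => (l[i]?).getD "") = l := by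
  apply List.ext_getElem
  · simp
  · intro i h1 h2
    simp [List.getElem?_eq_getElem h2]

-- sorted2 is sorted with the corresponding lexicographic key
theorem pvSorted2_eq {α κ₁ κ₂ : Type} [LinearOrder κ₁] [LinearOrder κ₂] (xs : List α)
    (k1 : α → κ₁) (k2 : α → κ₂) :
    PySem.List.sorted2 xs k1 k2 = PySem.List.sorted xs (fun x => toLex (k1 x, k2 x)) := by
  show List.foldl _ [] xs = List.foldl _ [] xs
  have h : (fun (a b : α) => decide (k1 a < k1 b) || (!decide (k1 b < k1 a) && decide (k2 a < k2 b)))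
      = (fun (a b : α) => decide (toLex (k1 a, k2 a) < toLex (k1 b, k2 b))) := by
    funext a b
    rcases lt_trichotomy (k1 a) (k1 b) with h | h | h <;>
      simp [Prod.Lex.lt_iff, h, not_lt_of_gt]
  simp only [Bool.false_eq_true, if_false, h]

-- sorting a mapped list sorts the underlying list by the composed key
theorem pvInsertBy_map {α β : Type} (h : α → β) (before : β → β → Bool) (x : α) (acc : List α) :
    PySem.List.insertBy before (h x) (acc.map h)
      = (PySem.List.insertBy (fun a b => before (h a) (h b)) x acc).map h := by
  induction acc with
  | nil => simp [PySem.List.insertBy]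
  | cons y ys ih =>
    by_cases hb : before (h x) (h y) <;> simp [PySem.List.insertBy, hb, ih]

theorem pvSorted_map {α β κ : Type} [LT κ] [DecidableLT κ] (h : α → β) (key : β → κ) (l : List α) :
    PySem.List.sorted (l.map h) key = (PySem.List.sorted l (fun x => key (h x))).map h := by
  show List.foldl _ [] (l.map h) = List.map h (List.foldl _ [] l)
  simp only [Bool.false_eq_true, if_false]
  rw [List.foldl_map]
  have step : ∀ (acc : List α) (rest : List α),
      rest.foldl (fun acc x => PySem.List.insertBy (fun a b => decide (key a < key b)) (h x) acc) (acc.map h)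
        = (rest.foldl (fun acc x => PySem.List.insertBy (fun a b => decide (key (h a) < key (h b))) x acc) acc).map h := by
    intro acc rest
    induction rest generalizing acc with
    | nil => simp
    | cons x xs ih => simp only [List.foldl_cons, pvInsertBy_map, ih]
  simpa using step [] l

theorem pvKey_injective : Function.Injective pvKeyL := by
  intro a b h
  unfold pvKeyL pvKey at h
  by_cases ha : a.toList.filter (fun c => PySem.Chars.isdigit c) = [] <;>
    by_cases hb : b.toList.filter (fun c => PySem.Chars.isdigit c) = [] <;>
    simp [ha, hb, Prod.ext_iff] at h <;> tauto

-- A's result, rewritten through the loop lemmas, is the two-part sorted concatenation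
theorem pvA_eq (l : List String) :
    get_time_point_list_order l
      = PySem.List.sorted (l.filter pvP) (fun x => x)
        ++ PySem.List.sorted (l.filter (fun tp => !pvP tp)) pvK2 := by
  unfold get_time_point_list_order
  have hfun : (fun (s : List String × List Int × List Int × Int) time_point =>
        let no_letter_time_point :=
          (String.toList time_point).foldl (fun acc c => if PySem.Chars.isdigit c then acc ++ [c] else acc) []
        if no_letter_time_point = [] then
          (s.1 ++ [time_point], s.2.1 ++ [s.2.2.2], s.2.2.1 ++ [s.2.2.2], s.2.2.2 + 1)
        else
          (s.1 ++ [String.ofList no_letter_time_point], s.2.1 ++ [s.2.2.2], s.2.2.1, s.2.2.2 + 1))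
      = (fun (s : List String × List Int × List Int × Int) time_point =>
        if pvDig time_point = [] then
          (s.1 ++ [time_point], s.2.1 ++ [s.2.2.2], s.2.2.1 ++ [s.2.2.2], s.2.2.2 + 1)
        else
          (s.1 ++ [String.ofList (pvDig time_point)], s.2.1 ++ [s.2.2.2], s.2.2.1, s.2.2.2 + 1)) := by
    funext s tp
    simp only [pvNoLetter_eq]
  simp only [hfun, pvLoop1, List.nil_append]
  -- clean the second loop's body using the loop-1 characterisations
  have hbody : (pvFlg l 0).foldl
      (fun (s : List String × List Int × List String) flag =>
        if flag ∈ pvTto l 0 then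
          (s.1 ++ [(PySem.List.pyGet? l ((PySem.List.index? (pvFlg l 0) flag).getD 0)).getD ""],
           s.2.1, s.2.2)
        else
          (s.1,
           s.2.1 ++ [(PySem.Int.ofStr? ((PySem.List.pyGet? (l.map pvNL) ((PySem.List.index? (pvFlg l 0) flag).getD 0)).getD "")).getD 0],
           s.2.2 ++ [(PySem.List.pyGet? l ((PySem.List.index? (pvFlg l 0) flag).getD 0)).getD ""]))
      ([], [], [])
      = l.foldl
      (fun (s : List String × List Int × List String) tp =>
        if pvDig tp = [] then (s.1 ++ [tp], s.2.1, s.2.2)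
        else (s.1, s.2.1 ++ [pvNum tp], s.2.2 ++ [tp]))
      ([], [], []) := by
    conv_rhs => rw [← pvMap_getElem?_range l]
    rw [pvFlg_eq_map_range, List.foldl_map, List.foldl_map]
    apply PySem.List.foldl_congr_mem
    intro acc i hi
    have hilt : i < l.length := List.mem_range.mp hi
    rw [← pvFlg_eq_map_range]
    have hidx : PySem.List.index? (pvFlg l 0) (i : Int) = some i := by
      simpa using pvIndex_flg hilt 0
    rw [hidx]
    have hmem : ((i : Int) ∈ pvTto l 0) ↔ pvDig (l[i]'hilt) = [] := by
      simpa using pvMem_tto hilt 0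
    have hgetl : (PySem.List.pyGet? l ((i : Nat) : Int)).getD "" = l[i]'hilt := by
      rw [PySem.List.pyGet?_natCast]; simp [hilt]
    have hgetnl : (PySem.List.pyGet? (l.map pvNL) ((i : Nat) : Int)).getD "" = pvNL (l[i]'hilt) := by
      rw [PySem.List.pyGet?_natCast]; simp [hilt]
    have hgetD : (l[i]?).getD "" = l[i]'hilt := by simp [hilt]
    simp only [Option.getD_some, hgetl, hgetnl, hgetD]
    by_cases hc : pvDig (l[i]'hilt) = []
    · rw [if_pos (hmem.mpr hc), if_pos hc]
    · rw [if_neg (fun h => hc (hmem.mp h)), if_neg hc]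
      have hofs : PySem.Int.ofStr? (pvNL (l[i]'hilt)) = PySem.Int.ofChars? (pvDig (l[i]'hilt)) := by
        simp [pvNL, hc, PySem.Int.ofStr?]
      rw [hofs]
      rfl
  rw [hbody, pvLoop2]
  simp only [List.nil_append]
  -- the b_list/actual_time_list zip is a map, and sorted2 of it is a lex sort
  have hzip : List.zip ((l.filter (fun tp => !pvP tp)).map pvNum) (l.filter (fun tp => !pvP tp))
      = (l.filter (fun tp => !pvP tp)).map (fun tp => (pvNum tp, tp)) := by
    simpa using List.zip_map' (f := pvNum) (g := id) (l := l.filter (fun tp => !pvP tp))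
  rw [hzip, pvSorted2_eq ((l.filter (fun tp => !pvP tp)).map (fun tp => (pvNum tp, tp))) Prod.fst Prod.snd,
    pvSorted_map]
  congr 1
  rw [List.map_map]
  have : (Prod.snd ∘ fun tp => ((pvNum tp, tp) : Int × String)) = id := rfl
  rw [this, List.map_id]
  rfl

theorem pvKey_of_P {a : String} (h : pvP a = true) : pvKeyL a = toLex (0, toLex (0, a)) := by
  simp only [pvP, decide_eq_true_eq, pvDig] at h
  simp [pvKeyL, pvKey, h]

theorem pvKey_of_not_P {a : String} (h : ¬ pvP a = true) : pvKeyL a = toLex (1, pvK2 a) := by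
  simp only [pvP, decide_eq_true_eq, pvDig] at h
  simp [pvKeyL, pvKey, h, pvK2, pvNum, pvDig]

theorem pvA_pairwise (l : List String) :
    (PySem.List.sorted (l.filter pvP) (fun x => x)
      ++ PySem.List.sorted (l.filter (fun tp => !pvP tp)) pvK2).Pairwise
      (fun a b => pvKeyL a ≤ pvKeyL b) := by
  rw [List.pairwise_append]
  refine ⟨?_, ?_, ?_⟩
  · have hp := PySem.List.sorted_pairwise (l.filter pvP) (fun x => x)
    refine hp.imp_of_mem ?_
    intro a b ha hb hle
    rw [PySem.List.mem_sorted] at ha hb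
    have ha' : pvP a = true := (List.mem_filter.mp ha).2
    have hb' : pvP b = true := (List.mem_filter.mp hb).2
    rw [pvKey_of_P ha', pvKey_of_P hb']
    rw [Prod.Lex.le_iff]
    right
    exact ⟨rfl, by rw [Prod.Lex.le_iff]; right; exact ⟨rfl, hle⟩⟩
  · have hp := PySem.List.sorted_pairwise (l.filter (fun tp => !pvP tp)) pvK2
    refine hp.imp_of_mem ?_
    intro a b ha hb hle
    rw [PySem.List.mem_sorted] at ha hb
    have ha' : ¬ pvP a = true := by simpa using (List.mem_filter.mp ha).2
    have hb' : ¬ pvP b = true := by simpa using (List.mem_filter.mp hb).2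
    rw [pvKey_of_not_P ha', pvKey_of_not_P hb']
    rw [Prod.Lex.le_iff]
    right
    exact ⟨rfl, hle⟩
  · intro a ha b hb
    rw [PySem.List.mem_sorted] at ha hb
    have ha' : pvP a = true := (List.mem_filter.mp ha).2
    have hb' : ¬ pvP b = true := by simpa using (List.mem_filter.mp hb).2
    rw [pvKey_of_P ha', pvKey_of_not_P hb']
    rw [Prod.Lex.le_iff]
    left
    norm_num

theorem pvA_perm (l : List String) :
    (PySem.List.sorted (l.filter pvP) (fun x => x)
      ++ PySem.List.sorted (l.filter (fun tp => !pvP tp)) pvK2).Perm l := by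
  have h1 := PySem.List.sorted_perm (l.filter pvP) (fun x => x) false
  have h2 := PySem.List.sorted_perm (l.filter (fun tp => !pvP tp)) pvK2 false
  exact (h1.append h2).trans (List.filter_append_perm pvP l)

-- ===== VERDICT (by name: the statement is the Claim_ definition above) =====
theorem get_time_point_list_order_spec : Claim_equal_get_time_point_list_order := by
  intro l _
  show get_time_point_list_order l = get_time_point_list_order_alt l
  rw [pvA_eq]
  unfold get_time_point_list_order_alt
  rw [pvSorted2_eq l (fun tp => (pvKey tp).1) (fun tp => (pvKey tp).2)]
  exact PySem.List.eq_of_perm_of_pairwise_le_of_injective pvKeyL pvKey_injective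
    ((pvA_perm l).trans (PySem.List.sorted_perm l pvKeyL false).symm)
    (pvA_pairwise l)
    (PySem.List.sorted_pairwise l pvKeyL)
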